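-- pv_equiv track=rewrite | github.com/inquisitive-genusvedalia144/smartest-tv | src/smartest_tv/_engine/resolve.py | _find_all_sequential_clusters
-- ===== SOURCE A (Python) =====
-- def _find_all_sequential_clusters(ids: list[int], min_length: int = 3) -> list[list[int]]:
--     """Find all consecutive runs of at least min_length in a sorted list.
--
--     Netflix episode IDs are consecutive (e.g., 81726715-81726725 for S1,
--     82656790-82656799 for S2). Non-episode IDs (recommendations, season IDs)
--     are scattered and won't form long runs.
--
--     Args:
--         ids: Sorted, deduplicated list of integer IDs.
--         min_length: Minimum cluster length to include (default 3 filters noise).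
--
--     Returns:
--         List of clusters, each cluster is a list of consecutive IDs.
--     """
--     if not ids:
--         return []
--
--     sorted_ids = sorted(set(ids))
--     clusters: list[list[int]] = []
--     current = [sorted_ids[0]]
--
--     for i in range(1, len(sorted_ids)):
--         if sorted_ids[i] == sorted_ids[i - 1] + 1:
--             current.append(sorted_ids[i])
--         else:
--             if len(current) >= min_length:
--                 clusters.append(current)
--             current = [sorted_ids[i]]
--
--     if len(current) >= min_length:
--         clusters.append(current)
--
--     return clusters
-- ===== SOURCE B (Python) =====
-- def _find_all_sequential_clusters(ids: list[int], min_length: int = 3) -> list[list[int]]: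
--     """Split the sorted distinct ids into maximal consecutive runs (two-pointer
--     slicing), then keep the runs of length >= min_length."""
--     sorted_ids = sorted(set(ids))
--     n = len(sorted_ids)
--     runs = []
--     i = 0
--     while i < n:
--         j = i + 1
--         while j < n and sorted_ids[j] == sorted_ids[j - 1] + 1:
--             j += 1
--         runs.append(sorted_ids[i:j])
--         i = j
--     return [run for run in runs if len(run) >= min_length]
-- ===== Notes on version B (the rewrite author's own statement) =====
-- stated objective: alternative
-- what changed: Replaces A's accumulator-and-flush loop (append-or-flush per element plus a trailing flush) with a two-pointer pass that slices the sorted distinct ids into maximal consecutive runs, followed by a separate length filter.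
import Mathlib
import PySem

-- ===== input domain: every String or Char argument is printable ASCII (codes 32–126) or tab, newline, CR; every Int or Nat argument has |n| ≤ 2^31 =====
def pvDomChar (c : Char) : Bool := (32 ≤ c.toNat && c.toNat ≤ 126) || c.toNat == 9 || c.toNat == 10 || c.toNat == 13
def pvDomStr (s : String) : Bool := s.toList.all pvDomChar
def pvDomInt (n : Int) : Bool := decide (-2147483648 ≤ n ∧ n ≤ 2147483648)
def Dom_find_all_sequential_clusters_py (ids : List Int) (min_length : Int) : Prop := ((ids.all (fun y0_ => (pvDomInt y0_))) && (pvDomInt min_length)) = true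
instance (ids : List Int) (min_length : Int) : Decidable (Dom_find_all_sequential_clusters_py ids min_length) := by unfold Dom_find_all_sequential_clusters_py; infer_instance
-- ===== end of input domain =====

-- B replaces A's accumulator-and-flush loop with a split-into-maximal-runs pass followed by a length filter (alternative decomposition, same cost).


-- ===== PORT A =====
-- A's loop over range(1, len) compares sorted_ids[i] with sorted_ids[i-1]; the fold
-- carries prev = sorted_ids[i-1] alongside (clusters, current), step for step.
def find_all_sequential_clusters_py (ids : List Int) (min_length : Int) : List (List Int) :=
  if ids = [] then []
  else
    let sorted_ids := PySem.List.sorted (PySem.Set.ofList ids) (fun x => x)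
    match sorted_ids with
    | [] => []
    | h :: rest =>
      let st := rest.foldl
        (fun (st : List (List Int) × List Int × Int) v =>
          if v = st.2.2 + 1 then (st.1, st.2.1 ++ [v], v)
          else if min_length ≤ (st.2.1.length : Int) then (st.1 ++ [st.2.1], [v], v)
          else (st.1, [v], v))
        ([], [h], h)
      if min_length ≤ (st.2.1.length : Int) then st.1 ++ [st.2.1] else st.1

-- ===== PORT B =====
-- inner while loop of Source B: peel off the rest of the maximal consecutive run after x
def pvTakeRun (x : Int) : List Int → List Int × List Int
  | [] => ([], [])
  | y :: ys =>
    if y = x + 1 then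
      let p := pvTakeRun y ys
      (y :: p.1, p.2)
    else ([], y :: ys)

theorem pvTakeRun_snd_length (x : Int) (l : List Int) : (pvTakeRun x l).2.length ≤ l.length := by
  induction l generalizing x with
  | nil => simp [pvTakeRun]
  | cons y ys ih =>
    simp only [pvTakeRun]
    split
    · exact Nat.le_succ_of_le (ih y)
    · simp

-- outer while loop of Source B: slice the list into maximal consecutive runs
def pvRuns : List Int → List (List Int)
  | [] => []
  | x :: xs =>
    let p := pvTakeRun x xs
    (x :: p.1) :: pvRuns p.2
termination_by l => l.length
decreasing_by simpa using Nat.lt_succ_of_le (pvTakeRun_snd_length x xs)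

def find_all_sequential_clusters_py_alt (ids : List Int) (min_length : Int) : List (List Int) :=
  (pvRuns (PySem.List.sorted (PySem.Set.ofList ids) (fun x => x))).filter
    (fun run => min_length ≤ (run.length : Int))

-- ===== PRECONDITION & SPEC =====
def Spec_find_all_sequential_clusters_py (ids : List Int) (min_length : Int) (out : List (List Int)) : Prop := out = find_all_sequential_clusters_py_alt ids min_length
instance (ids : List Int) (min_length : Int) (out : List (List Int)) : Decidable (Spec_find_all_sequential_clusters_py ids min_length out) := by unfold Spec_find_all_sequential_clusters_py; infer_instance

-- ===== CLAIM (what is proved, stated in full; the proofs are below) =====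
def Claim_equal_find_all_sequential_clusters_py : Prop := ∀ (ids : List Int) (min_length : Int), Dom_find_all_sequential_clusters_py ids min_length → Spec_find_all_sequential_clusters_py ids min_length (find_all_sequential_clusters_py ids min_length)

-- ===== LEMMAS AND PROOFS =====

-- A's loop, started with any already-flushed clusters `cls` and a pending run ending in
-- `prev`, finishes to `cls` ++ the filtered completion of that run plus the later runs.
theorem pvLoop_eq (m : Int) (xs : List Int) :
    ∀ (cls : List (List Int)) (cur : List Int) (prev : Int),
    (let st := xs.foldl
        (fun (st : List (List Int) × List Int × Int) v =>
          if v = st.2.2 + 1 then (st.1, st.2.1 ++ [v], v)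
          else if m ≤ (st.2.1.length : Int) then (st.1 ++ [st.2.1], [v], v)
          else (st.1, [v], v))
        (cls, cur ++ [prev], prev)
     if m ≤ (st.2.1.length : Int) then st.1 ++ [st.2.1] else st.1)
    = cls ++ ((cur ++ prev :: (pvTakeRun prev xs).1) :: pvRuns (pvTakeRun prev xs).2).filter
        (fun run => m ≤ (run.length : Int)) := by
  induction xs with
  | nil =>
    intro cls cur prev
    simp only [List.foldl_nil, pvTakeRun, pvRuns, List.filter]
    by_cases h : m ≤ ((cur ++ [prev]).length : Int)
    · simp only [if_pos h]
      simp only [List.length_append, List.length_cons, List.length_nil, Nat.cast_add,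
        Nat.cast_one, zero_add] at h ⊢
      simp [h]
    · simp only [if_neg h]
      simp only [List.length_append, List.length_cons, List.length_nil, Nat.cast_add,
        Nat.cast_one, zero_add] at h ⊢
      simp [h]
  | cons v vs ih =>
    intro cls cur prev
    simp only [List.foldl_cons, pvTakeRun]
    by_cases hv : v = prev + 1
    · simp only [hv, if_true]
      have h2 := ih cls (cur ++ [prev]) (prev + 1)
      simp only [List.append_assoc] at h2 ⊢
      simpa using h2
    · simp only [if_neg hv]
      by_cases hm : m ≤ ((cur ++ [prev]).length : Int)
      · simp only [if_pos hm]
        have h2 := ih (cls ++ [cur ++ [prev]]) [] v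
        simp only [List.nil_append] at h2
        rw [h2, pvRuns]
        have hm' : m ≤ (cur.length : Int) + 1 := by simpa using hm
        simp [List.filter, hm']
      · simp only [if_neg hm]
        have h2 := ih cls [] v
        simp only [List.nil_append] at h2
        rw [h2, pvRuns]
        have hm' : ¬ m ≤ (cur.length : Int) + 1 := by simpa using hm
        simp [List.filter, hm']

-- ===== VERDICT (by name: the statement is the Claim_ definition above) =====
theorem find_all_sequential_clusters_py_spec : Claim_equal_find_all_sequential_clusters_py := by
  intro ids m _
  unfold Spec_find_all_sequential_clusters_py find_all_sequential_clusters_py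
    find_all_sequential_clusters_py_alt
  by_cases hids : ids = []
  · subst hids
    have he : (PySem.List.sorted ([] : List Int) (fun x => x)) = [] := rfl
    simp [he, pvRuns]
  · simp only [if_neg hids]
    cases hs : PySem.List.sorted (PySem.Set.ofList ids) (fun x => x) with
    | nil => simp [pvRuns]
    | cons h rest =>
      have h2 := pvLoop_eq m rest [] [] h
      simp only [List.nil_append] at h2
      simpa [pvRuns] using h2
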